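-- pv_equiv track=rewrite | github.com/Quantum-Codes/AttorneysInRAGs | backend/app/core/severity_engine.py | compute_overall_severity
-- ===== SOURCE A (Python) =====
-- def compute_overall_severity(violations):
--     if not violations:
--         return "LOW"
--
--     severities = {v["severity"] for v in violations}
--
--     # Dominant severity logic (legal-first)
--     if "CRITICAL" in severities:
--         return "CRITICAL"
--     if "HIGH" in severities:
--         return "HIGH"
--     if "MEDIUM" in severities:
--         return "MEDIUM"
--
--     return "LOW"
-- ===== SOURCE B (Python) =====
-- def _rank(s):
--     if s == "CRITICAL":
--         return 3
--     if s == "HIGH":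
--         return 2
--     if s == "MEDIUM":
--         return 1
--     return 0
--
--
-- def compute_overall_severity(violations):
--     result = "LOW"
--     best = 0
--     for v in violations:
--         s = v["severity"]
--         r = _rank(s)
--         if r > best:
--             result = s
--             best = r
--     return result
-- ===== Notes on version B (the rewrite author's own statement) =====
-- stated objective: alternative
-- what changed: Replaces A's build-a-set-then-ordered-membership-checks with a single pass keeping a running maximum severity rank (unknown severities rank 0, so only recognised levels can upgrade the result).
import Mathlib
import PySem

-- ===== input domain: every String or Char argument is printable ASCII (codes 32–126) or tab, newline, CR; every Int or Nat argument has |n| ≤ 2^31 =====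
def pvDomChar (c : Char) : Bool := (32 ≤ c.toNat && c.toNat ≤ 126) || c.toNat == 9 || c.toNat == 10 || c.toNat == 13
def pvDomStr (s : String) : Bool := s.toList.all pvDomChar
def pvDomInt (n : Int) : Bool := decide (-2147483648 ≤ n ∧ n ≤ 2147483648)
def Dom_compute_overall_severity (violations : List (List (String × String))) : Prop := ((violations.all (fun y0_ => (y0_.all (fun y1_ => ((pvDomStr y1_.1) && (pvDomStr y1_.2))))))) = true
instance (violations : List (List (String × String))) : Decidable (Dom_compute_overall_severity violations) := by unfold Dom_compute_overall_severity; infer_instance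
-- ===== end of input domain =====

-- B replaces A's set-then-ordered-membership-checks by a single pass keeping a running maximum
-- severity rank; Pre_ excludes violation dicts without a "severity" key, on which Python A raises KeyError.


-- v["severity"]: first-match association-list lookup (total stand-in; Pre_ guarantees the key exists,
-- exactly where Python returns instead of raising KeyError)
def sevOf (v : List (String × String)) : String :=
  match v.find? (fun p => p.1 == "severity") with
  | some p => p.2
  | none => ""

-- ===== PORT A =====
def compute_overall_severity (violations : List (List (String × String))) : String :=
  if violations = [] then "LOW"
  else
    let severities : PySem.Set String := PySem.Set.ofList (violations.map sevOf)
    if PySem.Set.contains severities "CRITICAL" then "CRITICAL"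
    else if PySem.Set.contains severities "HIGH" then "HIGH"
    else if PySem.Set.contains severities "MEDIUM" then "MEDIUM"
    else "LOW"

-- ===== PORT B =====
def rankOf (s : String) : Nat :=
  if s = "CRITICAL" then 3
  else if s = "HIGH" then 2
  else if s = "MEDIUM" then 1
  else 0

def compute_overall_severity_alt (violations : List (List (String × String))) : String :=
  (violations.foldl
    (fun st v =>
      let s := sevOf v
      let r := rankOf s
      if st.2 < r then (s, r) else st)
    ("LOW", 0)).1

-- ===== PRECONDITION & SPEC =====
-- Pre_ admits exactly the inputs where every violation dict has a "severity" key; elsewhere Python A raises KeyError.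
def Pre_compute_overall_severity (violations : List (List (String × String))) : Prop :=
  (violations.all (fun v => v.any (fun p => p.1 == "severity"))) = true
instance (violations : List (List (String × String))) : Decidable (Pre_compute_overall_severity violations) := by
  unfold Pre_compute_overall_severity; infer_instance

def pvWitness_compute_overall_severity : (List (List (String × String))) :=
  [[("severity", "HIGH")], [("severity", "nonsense")]]

def Spec_compute_overall_severity (violations : List (List (String × String))) (out : String) : Prop := out = compute_overall_severity_alt violations
instance (violations : List (List (String × String))) (out : String) : Decidable (Spec_compute_overall_severity violations out) := by unfold Spec_compute_overall_severity; infer_instance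

-- ===== CLAIM (what is proved, stated in full; the proofs are below) =====
def Claim_equal_compute_overall_severity : Prop := ∀ (violations : List (List (String × String))), Dom_compute_overall_severity violations → Pre_compute_overall_severity violations → Spec_compute_overall_severity violations (compute_overall_severity violations)

-- ===== LEMMAS AND PROOFS =====

-- canonical level name of a rank
def nameOf (n : Nat) : String :=
  if n = 3 then "CRITICAL" else if n = 2 then "HIGH" else if n = 1 then "MEDIUM" else "LOW"

theorem rankOf_le (s : String) : rankOf s ≤ 3 := by
  unfold rankOf; split_ifs <;> omega

theorem name_rank (s : String) (h : 0 < rankOf s) : s = nameOf (rankOf s) := by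
  unfold rankOf at *
  split_ifs at h with h1 h2 h3 <;> simp_all [nameOf]

-- running max over the ranks
def maxRank (violations : List (List (String × String))) (r0 : Nat) : Nat :=
  violations.foldl (fun m v => max m (rankOf (sevOf v))) r0

theorem foldB_eq (violations : List (List (String × String))) :
    ∀ r0 : Nat,
    violations.foldl
      (fun st v =>
        let s := sevOf v
        let r := rankOf s
        if st.2 < r then (s, r) else st)
      (nameOf r0, r0)
      = (nameOf (maxRank violations r0), maxRank violations r0) := by
  induction violations with
  | nil => intro r0; simp [maxRank]
  | cons v vs ih =>
    intro r0
    simp only [List.foldl_cons, maxRank] at *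
    by_cases h : r0 < rankOf (sevOf v)
    · have hs : sevOf v = nameOf (rankOf (sevOf v)) := name_rank _ (Nat.lt_of_le_of_lt (Nat.zero_le _) h)
      have hmax : max r0 (rankOf (sevOf v)) = rankOf (sevOf v) := Nat.max_eq_right (Nat.le_of_lt h)
      rw [if_pos h, hmax]
      have hpair : ((sevOf v, rankOf (sevOf v)) : String × Nat)
          = (nameOf (rankOf (sevOf v)), rankOf (sevOf v)) := by
        rw [Prod.mk.injEq]; exact ⟨hs, rfl⟩
      rw [hpair]
      exact ih (rankOf (sevOf v))
    · have hmax : max r0 (rankOf (sevOf v)) = r0 := Nat.max_eq_left (Nat.le_of_not_lt h)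
      rw [if_neg h, hmax]
      exact ih r0

theorem alt_eq_name (violations : List (List (String × String))) :
    compute_overall_severity_alt violations = nameOf (maxRank violations 0) := by
  unfold compute_overall_severity_alt
  exact congrArg Prod.fst (foldB_eq violations 0)

theorem maxRank_le (violations : List (List (String × String))) : maxRank violations 0 ≤ 3 := by
  unfold maxRank
  have gen : ∀ (l : List (List (String × String))) (r0 : Nat), r0 ≤ 3 →
      l.foldl (fun m v => max m (rankOf (sevOf v))) r0 ≤ 3 := by
    intro l
    induction l with
    | nil => intro r0 h; simpa
    | cons x xs ihx =>
      intro r0 h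
      simp only [List.foldl_cons]
      exact ihx _ (Nat.max_le.mpr ⟨h, rankOf_le _⟩)
  exact gen violations 0 (by omega)

theorem le_maxRank_iff (violations : List (List (String × String))) (k : Nat) (hk : 0 < k) :
    k ≤ maxRank violations 0 ↔ ∃ v ∈ violations, k ≤ rankOf (sevOf v) := by
  unfold maxRank
  have gen : ∀ (l : List (List (String × String))) (r0 : Nat),
      (k ≤ l.foldl (fun m v => max m (rankOf (sevOf v))) r0 ↔
        k ≤ r0 ∨ ∃ v ∈ l, k ≤ rankOf (sevOf v)) := by
    intro l
    induction l with
    | nil => intro r0; simp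
    | cons x xs ihx =>
      intro r0
      simp only [List.foldl_cons, ihx, List.mem_cons]
      constructor
      · rintro (h | ⟨v, hv, hr⟩)
        · rcases le_max_iff.mp h with h' | h'
          · exact Or.inl h'
          · exact Or.inr ⟨x, Or.inl rfl, h'⟩
        · exact Or.inr ⟨v, Or.inr hv, hr⟩
      · rintro (h | ⟨v, (rfl | hv), hr⟩)
        · exact Or.inl (le_max_iff.mpr (Or.inl h))
        · exact Or.inl (le_max_iff.mpr (Or.inr hr))
        · exact Or.inr ⟨v, hv, hr⟩
  rw [gen]
  have hk0 : ¬ k ≤ 0 := by omega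
  tauto

theorem rank_ge3_iff (s : String) : 3 ≤ rankOf s ↔ s = "CRITICAL" := by
  unfold rankOf; split_ifs <;> simp_all

theorem rank_ge2_iff (s : String) : 2 ≤ rankOf s ↔ s = "CRITICAL" ∨ s = "HIGH" := by
  unfold rankOf; split_ifs <;> simp_all

theorem rank_ge1_iff (s : String) : 1 ≤ rankOf s ↔ s = "CRITICAL" ∨ s = "HIGH" ∨ s = "MEDIUM" := by
  unfold rankOf; split_ifs <;> simp_all

theorem mem_levels_iff (violations : List (List (String × String))) (L : String) :
    PySem.Set.contains (PySem.Set.ofList (violations.map sevOf)) L = true ↔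
      ∃ v ∈ violations, sevOf v = L := by
  rw [PySem.Set.contains_iff, PySem.Set.mem_ofList]
  simp [List.mem_map]

-- ===== VERDICT (by name: the statement is the Claim_ definition above) =====
theorem compute_overall_severity_spec : Claim_equal_compute_overall_severity := by
  intro violations _ _
  unfold Spec_compute_overall_severity
  rw [alt_eq_name]
  unfold compute_overall_severity
  by_cases hnil : violations = []
  · subst hnil; simp [maxRank, nameOf]
  · rw [if_neg hnil]
    have hM3 := maxRank_le violations
    have hC := mem_levels_iff violations "CRITICAL"
    have hH := mem_levels_iff violations "HIGH"
    have hMm := mem_levels_iff violations "MEDIUM"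
    by_cases c3 : 3 ≤ maxRank violations 0
    · have hMem : ∃ v ∈ violations, sevOf v = "CRITICAL" := by
        obtain ⟨v, hv, hr⟩ := (le_maxRank_iff violations 3 (by omega)).mp c3
        exact ⟨v, hv, (rank_ge3_iff (sevOf v)).mp hr⟩
      have hM : maxRank violations 0 = 3 := by omega
      rw [if_pos (hC.mpr hMem), hM]; simp [nameOf]
    · have hNC : ¬ ∃ v ∈ violations, sevOf v = "CRITICAL" := by
        rintro ⟨v, hv, hs⟩
        exact c3 ((le_maxRank_iff violations 3 (by omega)).mpr
          ⟨v, hv, (rank_ge3_iff (sevOf v)).mpr hs⟩)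
      rw [if_neg (fun h => hNC (hC.mp h))]
      by_cases c2 : 2 ≤ maxRank violations 0
      · have hMem : ∃ v ∈ violations, sevOf v = "HIGH" := by
          obtain ⟨v, hv, hr⟩ := (le_maxRank_iff violations 2 (by omega)).mp c2
          rcases (rank_ge2_iff (sevOf v)).mp hr with h | h
          · exact absurd ⟨v, hv, h⟩ hNC
          · exact ⟨v, hv, h⟩
        have hM : maxRank violations 0 = 2 := by omega
        rw [if_pos (hH.mpr hMem), hM]; simp [nameOf]
      · have hNH : ¬ ∃ v ∈ violations, sevOf v = "HIGH" := by
          rintro ⟨v, hv, hs⟩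
          exact c2 ((le_maxRank_iff violations 2 (by omega)).mpr
            ⟨v, hv, (rank_ge2_iff (sevOf v)).mpr (Or.inr hs)⟩)
        rw [if_neg (fun h => hNH (hH.mp h))]
        by_cases c1 : 1 ≤ maxRank violations 0
        · have hMem : ∃ v ∈ violations, sevOf v = "MEDIUM" := by
            obtain ⟨v, hv, hr⟩ := (le_maxRank_iff violations 1 (by omega)).mp c1
            rcases (rank_ge1_iff (sevOf v)).mp hr with h | h | h
            · exact absurd ⟨v, hv, h⟩ hNC
            · exact absurd ⟨v, hv, h⟩ hNH
            · exact ⟨v, hv, h⟩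
          have hM : maxRank violations 0 = 1 := by omega
          rw [if_pos (hMm.mpr hMem), hM]; simp [nameOf]
        · have hNM : ¬ ∃ v ∈ violations, sevOf v = "MEDIUM" := by
            rintro ⟨v, hv, hs⟩
            exact c1 ((le_maxRank_iff violations 1 (by omega)).mpr
              ⟨v, hv, (rank_ge1_iff (sevOf v)).mpr (Or.inr (Or.inr hs))⟩)
          rw [if_neg (fun h => hNM (hMm.mp h))]
          have hM : maxRank violations 0 = 0 := by omega
          rw [hM]; simp [nameOf]
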